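-- pv_equiv track=rewrite | github.com/YangYeojin/Python-Study | Programmers/level2/더 맵게.py | solution
-- ===== SOURCE A (Python) =====
-- import heapq
--
-- def solution(scoville, K):
--     answer = 0
--     i = 0
--     heapq.heapify(scoville)
--     while scoville[0] <= K:
--         if len(scoville) == 1:
--             return -1
--         heapMin = heapq.heappop(scoville)
--         heapq.heappush(scoville, heapMin + heapq.heappop(scoville) * 2)
--         answer += 1
--     return answer
-- ===== SOURCE B (Python) =====
-- def solution(scoville, K):
--     # Sorted-list strategy: sort once in place, then repeatedly take the two
--     # smallest from the front and insert the mix back at its sorted position.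
--     scoville.sort()
--     answer = 0
--     while scoville[0] <= K:
--         if len(scoville) == 1:
--             return -1
--         a = scoville.pop(0)
--         b = scoville.pop(0)
--         new = a + b * 2
--         i = 0
--         while i < len(scoville) and scoville[i] <= new:
--             i += 1
--         scoville.insert(i, new)
--         answer += 1
--     return answer
-- ===== Notes on version B (the rewrite author's own statement) =====
-- stated objective: alternative
-- what changed: Replaces the binary heap with a fully sorted list maintained by linear insertion: sort once, pop the two smallest from the front, insert a+2b back at its sorted position.
import Mathlib
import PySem

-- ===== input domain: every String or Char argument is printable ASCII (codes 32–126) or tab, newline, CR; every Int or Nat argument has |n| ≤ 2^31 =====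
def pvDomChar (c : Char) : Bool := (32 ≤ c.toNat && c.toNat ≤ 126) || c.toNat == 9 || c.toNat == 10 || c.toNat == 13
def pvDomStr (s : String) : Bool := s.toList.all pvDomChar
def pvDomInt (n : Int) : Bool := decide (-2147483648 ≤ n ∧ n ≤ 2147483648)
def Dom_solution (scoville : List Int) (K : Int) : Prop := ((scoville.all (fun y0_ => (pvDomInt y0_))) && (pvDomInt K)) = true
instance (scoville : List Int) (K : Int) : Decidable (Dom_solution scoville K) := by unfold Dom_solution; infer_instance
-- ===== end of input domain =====

-- B replaces A's binary heap by a fully sorted list maintained with linear insertion (same values,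
-- different data structure); the equivalence proved is about the RETURN value only — A heapifies its
-- list argument in place while B sorts it in place (same multiset, different final order).

-- ===== PORT A =====
-- Port of A and of the CPython heapq internals it calls (heapify/heappush/heappop with _siftdown and
-- _siftup from Lib/heapq.py), transliterated step for step on List Int.  List indexing is via getD 0;
-- this is exact because every index these functions read is in range (the default is never returned).
-- Loops are structural recursions on a fuel bound that provably exceeds the iteration count.
def hGet (l : List Int) (i : Nat) : Int := l.getD i 0

-- 'while pos > startpos: …' — fuel (pos strictly decreases, so pos+1 steps always suffice) only
-- makes the recursion structural; the exhausted-fuel branch is never reached at the call sites.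
def siftdownLoop : Nat → List Int → Nat → Nat → Int → List Int × Nat
  | 0, heap, _, pos, _ => (heap, pos)
  | fuel + 1, heap, startpos, pos, newitem =>
    if startpos < pos then
      if newitem < hGet heap ((pos - 1) / 2) then
        siftdownLoop fuel (heap.set pos (hGet heap ((pos - 1) / 2))) startpos ((pos - 1) / 2) newitem
      else (heap, pos)
    else (heap, pos)

def siftdown (heap : List Int) (startpos pos : Nat) : List Int :=
  match siftdownLoop (pos + 1) heap startpos pos (hGet heap pos) with
  | (h, q) => h.set q (hGet heap pos)

def pickChild (heap : List Int) (pos : Nat) : Nat :=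
  if 2 * pos + 2 < heap.length ∧ ¬ hGet heap (2 * pos + 1) < hGet heap (2 * pos + 2)
  then 2 * pos + 2 else 2 * pos + 1

-- 'while childpos < endpos: …' — pos strictly increases below heap.length, so heap.length steps suffice.
def siftupLoop : Nat → List Int → Nat → List Int × Nat
  | 0, heap, pos => (heap, pos)
  | fuel + 1, heap, pos =>
    if 2 * pos + 1 < heap.length then
      siftupLoop fuel (heap.set pos (hGet heap (pickChild heap pos))) (pickChild heap pos)
    else (heap, pos)

def siftup (heap : List Int) (pos : Nat) : List Int :=
  match siftupLoop heap.length heap pos with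
  | (h, q) => siftdown (h.set q (hGet heap pos)) pos q

def heapify (x : List Int) : List Int :=
  (List.range (x.length / 2)).reverse.foldl (fun h i => siftup h i) x

def heappop (heap : List Int) : Int × List Int :=
  if heap.isEmpty then (0, [])
  else if heap.dropLast.isEmpty then (hGet heap (heap.length - 1), [])
  else (hGet heap.dropLast 0, siftup (heap.dropLast.set 0 (hGet heap (heap.length - 1))) 0)

def heappush (heap : List Int) (item : Int) : List Int :=
  siftdown (heap ++ [item]) 0 ((heap ++ [item]).length - 1)

-- 'while scoville[0] <= K: …' — each iteration shrinks the heap by one element, so scoville.length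
-- steps suffice; 'scoville[0]' on an empty heap raises IndexError in Python (excluded by Pre_ below).
def solutionLoop : Nat → List Int → Int → Int → Int
  | 0, _, _, _ => 0
  | fuel + 1, heap, K, answer =>
    if heap = [] then 0
    else if hGet heap 0 ≤ K then
      if heap.length = 1 then -1
      else
        solutionLoop fuel (heappush ((heappop (heappop heap).2).2)
          ((heappop heap).1 + (heappop (heappop heap).2).1 * 2)) K (answer + 1)
    else answer

def solution (scoville : List Int) (K : Int) : Int :=
  solutionLoop scoville.length (heapify scoville) K 0


-- ===== PORT B =====
-- Port of Source B: sort once, then pop the two smallest from the front and insert the mix at its sorted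
-- position (insPos is Source B's index-scanning while loop, the take/append/drop is list.insert(i, new)).
def insPos (lst : List Int) (x : Int) : Nat :=
  match lst with
  | [] => 0
  | y :: ys => if y ≤ x then insPos ys x + 1 else 0

def insortB (lst : List Int) (x : Int) : List Int :=
  lst.take (insPos lst x) ++ x :: lst.drop (insPos lst x)

-- 'while scoville[0] <= K: …' of Source B — the list shrinks by one per iteration, same fuel bound.
def altLoop : Nat → List Int → Int → Int → Int
  | 0, _, _, _ => 0
  | fuel + 1, lst, K, answer =>
    match lst with
    | [] => 0
    | [a] => if a ≤ K then -1 else answer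
    | a :: b :: rest =>
        if a ≤ K then altLoop fuel (insortB rest (a + b * 2)) K (answer + 1) else answer

def solution_alt (scoville : List Int) (K : Int) : Int :=
  altLoop scoville.length (PySem.List.sorted scoville (fun x => x) false) K 0


-- ===== PRECONDITION & SPEC =====
-- Pre_ excludes only the empty list, on which the Python A raises IndexError at `scoville[0]`
-- (B raises the same way there).
def Pre_solution (scoville : List Int) (K : Int) : Prop := scoville ≠ []
instance (scoville : List Int) (K : Int) : Decidable (Pre_solution scoville K) := by
  unfold Pre_solution; infer_instance

def pvWitness_solution : List Int × Int := ([1, 2, 3, 9, 10, 12], 7)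

def Spec_solution (scoville : List Int) (K : Int) (out : Int) : Prop := out = solution_alt scoville K
instance (scoville : List Int) (K : Int) (out : Int) : Decidable (Spec_solution scoville K out) := by
  unfold Spec_solution; infer_instance

-- ===== CLAIM (what is proved, stated in full; the proofs are below) =====
def Claim_equal_solution : Prop := ∀ (scoville : List Int) (K : Int), Dom_solution scoville K → Pre_solution scoville K → Spec_solution scoville K (solution scoville K)

-- ===== LEMMAS AND PROOFS =====
-- ===== toolkit =====
theorem pickChild_lt (heap : List Int) (pos : Nat) (h : 2 * pos + 1 < heap.length) :
    pos < pickChild heap pos ∧ pickChild heap pos < heap.length := by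
  unfold pickChild; split <;> omega

theorem siftdownLoop_len : ∀ (fuel : Nat) (heap : List Int) (s pos : Nat) (ni : Int),
    ((siftdownLoop fuel heap s pos ni).1).length = heap.length := by
  intro fuel
  induction fuel with
  | zero => intro heap s pos ni; rfl
  | succ fuel IH =>
    intro heap s pos ni
    rw [siftdownLoop]
    split
    · split
      · rw [IH]; simp
      · rfl
    · rfl

theorem siftupLoop_len : ∀ (fuel : Nat) (heap : List Int) (pos : Nat),
    ((siftupLoop fuel heap pos).1).length = heap.length := by
  intro fuel
  induction fuel with
  | zero => intro heap pos; rfl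
  | succ fuel IH =>
    intro heap pos
    rw [siftupLoop]
    split
    · rw [IH]; simp
    · rfl

theorem siftdown_len (heap : List Int) (s pos : Nat) : (siftdown heap s pos).length = heap.length := by
  unfold siftdown
  have := siftdownLoop_len (pos + 1) heap s pos (hGet heap pos)
  rcases h : siftdownLoop (pos + 1) heap s pos (hGet heap pos) with ⟨h1, q⟩
  rw [h] at this
  simpa using this

theorem siftup_len (heap : List Int) (pos : Nat) : (siftup heap pos).length = heap.length := by
  unfold siftup
  have := siftupLoop_len heap.length heap pos
  rcases h : siftupLoop heap.length heap pos with ⟨h1, q⟩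
  rw [h] at this
  simp only [siftdown_len, List.length_set]
  simpa using this

theorem heappush_len (heap : List Int) (x : Int) : (heappush heap x).length = heap.length + 1 := by
  unfold heappush; rw [siftdown_len]; simp

theorem heappop_len (heap : List Int) (h : heap ≠ []) : ((heappop heap).2).length = heap.length - 1 := by
  unfold heappop
  rw [if_neg (by simpa using h)]
  split
  · rename_i h2
    rw [List.isEmpty_iff] at h2
    have h3 := congrArg List.length h2
    simp only [List.length_dropLast, List.length_nil] at h3
    simp [h3]
  · simp [siftup_len]

theorem hGet_eq_getElem (l : List Int) (k : Nat) (h : k < l.length) : hGet l k = l[k] := by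
  simp [hGet, List.getD_eq_getElem?_getD, List.getElem?_eq_getElem h]

theorem hGet_set (l : List Int) (i : Nat) (v : Int) (k : Nat) :
    hGet (l.set i v) k = if i = k ∧ i < l.length then v else hGet l k := by
  simp only [hGet, List.getD_eq_getElem?_getD, List.getElem?_set]
  split_ifs with h1 h2 h3 <;> simp_all <;> omega

theorem hGet_mem (l : List Int) (k : Nat) (h : k < l.length) : hGet l k ∈ l := by
  rw [hGet_eq_getElem l k h]; exact List.getElem_mem h

theorem set_hGet_self (l : List Int) (i : Nat) (h : i < l.length) : l.set i (hGet l i) = l := by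
  rw [hGet_eq_getElem l i h]; exact List.set_getElem_self h

theorem getD_cons_set_perm (l : List Int) (j : Nat) (a : Int) (h : j < l.length) :
    (hGet l j :: l.set j a).Perm (a :: l) := by
  induction l generalizing j with
  | nil => simp at h
  | cons y ys IH =>
    cases j with
    | zero =>
      simp only [hGet, List.getD_cons_zero, List.set_cons_zero]
      exact List.Perm.swap a y ys
    | succ j =>
      simp only [hGet, List.getD_cons_succ, List.set_cons_succ]
      have h1 : (hGet ys j :: y :: ys.set j a).Perm (y :: hGet ys j :: ys.set j a) :=
        List.Perm.swap y (hGet ys j) _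
      have h2 : (y :: hGet ys j :: ys.set j a).Perm (y :: a :: ys) :=
        (IH j (by simpa using h)).cons y
      have h3 : (y :: a :: ys).Perm (a :: y :: ys) := List.Perm.swap a y ys
      exact (h1.trans h2).trans h3

def swapL (l : List Int) (i j : Nat) : List Int := (l.set i (hGet l j)).set j (hGet l i)

theorem hGet_swapL (l : List Int) (i j k : Nat) (hi : i < l.length) (hj : j < l.length) :
    hGet (swapL l i j) k = if k = j then hGet l i else if k = i then hGet l j else hGet l k := by
  simp only [swapL, hGet_set, List.length_set]
  split_ifs <;> first | rfl | omega

theorem swapL_perm (l : List Int) (i j : Nat) (hi : i < l.length) (hj : j < l.length) :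
    (swapL l i j).Perm l := by
  by_cases hij : i = j
  · subst hij
    rw [swapL, List.set_set, set_hGet_self l i hi]
  · have h1 := getD_cons_set_perm (l.set i (hGet l j)) j (hGet l i)
      (by simpa using hj)
    have h2 := getD_cons_set_perm l i (hGet l j) hi
    have e : hGet (l.set i (hGet l j)) j = hGet l j := by
      rw [hGet_set]; simp [hij]
    rw [e] at h1
    exact (h1.trans h2).cons_inv

-- ===== tree-index infrastructure =====
def isChild (i j : Nat) : Prop := j = 2 * i + 1 ∨ j = 2 * i + 2

def descB (r i : Nat) : Bool :=
  if i = r then true else if r < i then descB r ((i - 1) / 2) else false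
  termination_by i
  decreasing_by omega

theorem descB_self (r : Nat) : descB r r = true := by rw [descB]; simp

theorem descB_le : ∀ (i r : Nat), descB r i = true → r ≤ i := by
  intro i
  induction i using Nat.strong_induction_on with
  | _ i IH =>
    intro r h
    rw [descB] at h
    split at h
    · omega
    · split at h
      · omega
      · simp at h

theorem descB_zero : ∀ (i : Nat), descB 0 i = true := by
  intro i
  induction i using Nat.strong_induction_on with
  | _ i IH =>
    rw [descB]
    split
    · rfl
    · split
      · exact IH ((i - 1) / 2) (by omega)
      · omega

theorem descB_par (r i : Nat) (h : descB r i = true) (hne : i ≠ r) :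
    r < i ∧ descB r ((i - 1) / 2) = true := by
  rw [descB] at h
  split at h
  · omega
  · split at h
    · exact ⟨by omega, h⟩
    · simp at h

theorem descB_child (r i j : Nat) (h : descB r i = true) (hc : isChild i j) :
    descB r j = true := by
  have hri := descB_le i r h
  have hij : i < j := by rcases hc with h1 | h1 <;> omega
  have hpar : (j - 1) / 2 = i := by rcases hc with h1 | h1 <;> omega
  rw [descB]
  split
  · rfl
  · split
    · rwa [hpar]
    · omega

theorem par_of_child (i j : Nat) (hc : isChild i j) : i = (j - 1) / 2 ∧ i < j := by
  rcases hc with h1 | h1 <;> constructor <;> omega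

theorem child_par (j : Nat) (h : 1 ≤ j) : isChild ((j - 1) / 2) j := by
  unfold isChild; omega

-- ===== _siftdown (bubble-up) correctness =====
theorem siftdownLoop_spec :
    ∀ (fuel : Nat) (pos : Nat) (heap : List Int) (s : Nat) (ni : Int) (h : List Int) (q : Nat),
    siftdownLoop fuel heap s pos ni = (h, q) →
    pos < fuel →
    s ≤ pos → pos < heap.length → descB s pos = true →
    (∀ i j, isChild i j → j < heap.length → descB s i = true → j ≠ pos →
        hGet (heap.set pos ni) i ≤ hGet (heap.set pos ni) j) →
    (s < pos → ∀ j, isChild pos j → j < heap.length →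
        hGet (heap.set pos ni) ((pos - 1) / 2) ≤ hGet (heap.set pos ni) j) →
    h.length = heap.length ∧ s ≤ q ∧ q < heap.length ∧
    (h.set q ni).Perm (heap.set pos ni) ∧
    (∀ m, descB s m = false → hGet (h.set q ni) m = hGet (heap.set pos ni) m) ∧
    (∀ i j, isChild i j → j < heap.length → descB s i = true →
        hGet (h.set q ni) i ≤ hGet (h.set q ni) j) := by
  intro fuel
  induction fuel with
  | zero => intro pos heap s ni h q _ hfu; omega
  | succ fuel IH =>
    intro pos heap s ni h q heq hfu hsp hlen hdesc inv1 inv2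
    rw [siftdownLoop] at heq
    by_cases hguard : s < pos
    · rw [if_pos hguard] at heq
      by_cases hlt : ni < hGet heap ((pos - 1) / 2)
      · -- recursive step: the virtual array swaps pos with its parent
        rw [if_pos hlt] at heq
        set pp := (pos - 1) / 2 with hpp
        have hpplt : pp < pos := by omega
        have hppd : descB s pp = true := (descB_par s pos hdesc (by omega)).2
        have hsppp : s ≤ pp := descB_le pp s hppd
        have hppl : pp < heap.length := by omega
        have hchild : isChild pp pos := by
          have := child_par pos (by omega); rwa [← hpp] at this
        set V := heap.set pos ni with hV
        have hVlen : V.length = heap.length := by simp [hV]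
        have hposV : pos < V.length := by omega
        have hppV : pp < V.length := by omega
        have hVpos : hGet V pos = ni := by
          rw [hV, hGet_set]; simp [hlen]
        have hVpp : hGet V pp = hGet heap pp := by
          rw [hV, hGet_set]
          simp only [if_neg (show ¬(pos = pp ∧ pos < heap.length) from by omega)]
        have hVother : ∀ m, m ≠ pos → hGet V m = hGet heap m := by
          intro m hm
          rw [hV, hGet_set]
          simp only [if_neg (show ¬(pos = m ∧ pos < heap.length) from by omega)]
        have hswap : (heap.set pos (hGet heap pp)).set pp ni = swapL V pos pp := by
          rw [swapL, hVpp, hVpos, hV, List.set_set]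
        have hgs : ∀ k, hGet (swapL V pos pp) k =
            if k = pp then hGet V pos else if k = pos then hGet V pp else hGet V k :=
          fun k => hGet_swapL V pos pp k hposV hppV
        have inv1' : ∀ i j, isChild i j → j < heap.length → descB s i = true → j ≠ pp →
            hGet (swapL V pos pp) i ≤ hGet (swapL V pos pp) j := by
          intro i j hc hj hdi hjp
          have hij := (par_of_child i j hc).2
          rw [hgs i, hgs j]
          by_cases hjpos : j = pos
          · have hipp : i = pp := by
              have := (par_of_child i j hc).1; omega
            rw [if_pos hipp, if_neg hjp, if_pos hjpos, hVpos, hVpp]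
            exact le_of_lt hlt
          · by_cases hipp : i = pp
            · rw [if_pos hipp, if_neg hjp, if_neg hjpos, hVpos]
              have hc2 : isChild pp j := by rwa [hipp] at hc
              have h1 : hGet V pp ≤ hGet V j := inv1 pp j hc2 hj hppd hjpos
              rw [hVpp] at h1
              exact le_trans (le_of_lt hlt) h1
            · by_cases hipos : i = pos
              · rw [if_neg hipp, if_pos hipos, if_neg hjp, if_neg hjpos]
                have hc2 : isChild pos j := by rwa [hipos] at hc
                exact inv2 hguard j hc2 hj
              · rw [if_neg hipp, if_neg hipos, if_neg hjp, if_neg hjpos]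
                exact inv1 i j hc hj hdi hjpos
        have inv2' : s < pp → ∀ j, isChild pp j → j < heap.length →
            hGet (swapL V pos pp) ((pp - 1) / 2) ≤ hGet (swapL V pos pp) j := by
          intro hspp j hc hj
          set ppp := (pp - 1) / 2 with hppp
          have hppplt : ppp < pp := by omega
          have hcpar : isChild ppp pp := by
            have := child_par pp (by omega); rwa [← hppp] at this
          have hdppp : descB s ppp = true := (descB_par s pp hppd (by omega)).2
          have h1 : hGet V ppp ≤ hGet V pp := inv1 ppp pp hcpar hppl hdppp (by omega)
          have hjgt := (par_of_child pp j hc).2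
          rw [hgs ppp, hgs j]
          rw [if_neg (by omega : ¬ ppp = pp), if_neg (by omega : ¬ ppp = pos),
              if_neg (by omega : ¬ j = pp)]
          by_cases hjpos : j = pos
          · rw [if_pos hjpos]; exact h1
          · rw [if_neg hjpos]
            exact le_trans h1 (inv1 pp j hc hj hppd hjpos)
        have hlen' : (heap.set pos (hGet heap pp)).length = heap.length := by simp
        obtain ⟨c1, c2, c3, c4, c5, c6⟩ :=
          IH pp (heap.set pos (hGet heap pp)) s ni h q heq (by omega) hsppp
            (by rw [hlen']; omega) hppd
            (by rw [hswap, hlen']; exact inv1')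
            (by rw [hswap, hlen']; exact inv2')
        rw [hswap] at c4 c5
        rw [hlen'] at c1 c3 c6
        refine ⟨c1, c2, c3, ?_, ?_, c6⟩
        · exact c4.trans (swapL_perm V pos pp hposV hppV)
        · intro m hm
          rw [c5 m hm, hgs m]
          have hmpos : m ≠ pos := by intro e; rw [e, hdesc] at hm; simp at hm
          have hmpp : m ≠ pp := by intro e; rw [e, hppd] at hm; simp at hm
          rw [if_neg hmpp, if_neg hmpos]
      · -- stop: newitem not smaller than parent
        rw [if_neg hlt] at heq
        injection heq with e1 e2
        subst e1; subst e2
        refine ⟨rfl, hsp, hlen, List.Perm.refl _, fun m _ => rfl, ?_⟩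
        intro i j hc hj hdi
        by_cases hjpos : j = pos
        · have hipp : i = (pos - 1) / 2 := by
            have := (par_of_child i j hc).1; omega
          have hilt : i < pos := by
            have := (par_of_child i j hc).2; omega
          have e1 : hGet (heap.set pos ni) i = hGet heap ((pos - 1) / 2) := by
            rw [hGet_set]
            rw [if_neg (show ¬(pos = i ∧ pos < heap.length) from by omega)]
            rw [hipp]
          have e2 : hGet (heap.set pos ni) pos = ni := by
            rw [hGet_set]; simp [hlen]
          rw [hjpos, e1, e2]
          exact not_lt.mp hlt
        · exact inv1 i j hc hj hdi hjpos
    · -- stop: reached startpos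
      rw [if_neg hguard] at heq
      injection heq with e1 e2
      subst e1; subst e2
      refine ⟨rfl, hsp, hlen, List.Perm.refl _, fun m _ => rfl, ?_⟩
      intro i j hc hj hdi
      by_cases hjpos : j = pos
      · have h1 := (par_of_child i j hc).2
        have h2 := descB_le i s hdi
        omega
      · exact inv1 i j hc hj hdi hjpos

-- ===== _siftup (sink-to-leaf) correctness =====
theorem pickChild_isChild (heap : List Int) (pos : Nat) :
    isChild pos (pickChild heap pos) := by
  unfold pickChild isChild; split <;> omega

theorem pickChild_min (heap : List Int) (pos : Nat) (hg : 2 * pos + 1 < heap.length) :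
    ∀ j, isChild pos j → j < heap.length → j ≠ pickChild heap pos →
      hGet heap (pickChild heap pos) ≤ hGet heap j := by
  intro j hc hj hne
  by_cases hcond : 2 * pos + 2 < heap.length ∧ ¬ hGet heap (2 * pos + 1) < hGet heap (2 * pos + 2)
  · rw [pickChild, if_pos hcond] at hne ⊢
    have hj1 : j = 2 * pos + 1 := by rcases hc with h1 | h1 <;> omega
    rw [hj1]
    exact not_lt.mp hcond.2
  · rw [pickChild, if_neg hcond] at hne ⊢
    have hj2 : j = 2 * pos + 2 := by rcases hc with h1 | h1 <;> omega
    rw [hj2]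
    rcases not_and_or.mp hcond with h1 | h1
    · omega
    · exact le_of_lt (not_not.mp h1)

theorem siftupLoop_spec :
    ∀ (fuel : Nat) (heap : List Int) (pos s : Nat) (ni : Int) (h : List Int) (q : Nat),
    heap.length - pos ≤ fuel →
    siftupLoop fuel heap pos = (h, q) →
    s ≤ pos → pos < heap.length → descB s pos = true →
    (∀ i j, isChild i j → j < heap.length → descB s i = true → i ≠ pos → j ≠ pos →
        hGet (heap.set pos ni) i ≤ hGet (heap.set pos ni) j) →
    (s < pos → ∀ j, isChild pos j → j < heap.length →
        hGet (heap.set pos ni) ((pos - 1) / 2) ≤ hGet (heap.set pos ni) j) →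
    h.length = heap.length ∧ s ≤ q ∧ q < heap.length ∧ descB s q = true ∧
    ¬ (2 * q + 1 < heap.length) ∧
    (h.set q ni).Perm (heap.set pos ni) ∧
    (∀ m, descB s m = false → hGet (h.set q ni) m = hGet (heap.set pos ni) m) ∧
    (∀ i j, isChild i j → j < heap.length → descB s i = true → j ≠ q →
        hGet (h.set q ni) i ≤ hGet (h.set q ni) j) := by
  intro fuel
  induction fuel with
  | zero => intro heap pos s ni h q hk _ _ hlen _ _ _; omega
  | succ fuel IHk =>
    intro heap pos s ni h q hk heq hsp hlen hdesc inv1 inv2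
    rw [siftupLoop] at heq
    by_cases hguard : 2 * pos + 1 < heap.length
    · rw [if_pos hguard] at heq
      set c := pickChild heap pos with hcdef
      have hpc := pickChild_lt heap pos hguard
      have hchild : isChild pos c := pickChild_isChild heap pos
      have hmin := pickChild_min heap pos hguard
      have hparc : (c - 1) / 2 = pos := by
        rcases hchild with h1 | h1 <;> omega
      have hdc : descB s c = true := descB_child s pos c hdesc hchild
      set V := heap.set pos ni with hV
      have hposV : pos < V.length := by simp [hV]; omega
      have hcV : c < V.length := by simp [hV]; omega
      have hVpos : hGet V pos = ni := by rw [hV, hGet_set]; simp [hlen]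
      have hVother : ∀ m, m ≠ pos → hGet V m = hGet heap m := by
        intro m hm
        rw [hV, hGet_set]
        rw [if_neg (show ¬(pos = m ∧ pos < heap.length) from by omega)]
      have hswap : (heap.set pos (hGet heap c)).set c ni = swapL V pos c := by
        rw [swapL, hVpos, hVother c (by omega), hV, List.set_set]
      have hgs : ∀ m, hGet (swapL V pos c) m =
          if m = c then hGet V pos else if m = pos then hGet V c else hGet V m :=
        fun m => hGet_swapL V pos c m hposV hcV
      have hlen' : (heap.set pos (hGet heap c)).length = heap.length := by simp
      have inv1' : ∀ i j, isChild i j → j < heap.length → descB s i = true → i ≠ c → j ≠ c →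
          hGet (swapL V pos c) i ≤ hGet (swapL V pos c) j := by
        intro i j hc hj hdi hic hjc
        rw [hgs i, hgs j]
        by_cases hjpos : j = pos
        · have hipar : i = (pos - 1) / 2 := by
            have := (par_of_child i j hc).1; omega
          have hilt : i < pos := by
            have := (par_of_child i j hc).2; omega
          rw [if_neg hic, if_neg (by omega : ¬ i = pos), if_neg hjc, if_pos hjpos]
          by_cases hsp2 : s < pos
          · have h1 := inv2 hsp2 c hchild (by omega)
            rwa [← hipar] at h1
          · have := descB_le i s hdi
            omega
        · by_cases hipos : i = pos
          · rw [if_neg hic, if_pos hipos, if_neg hjc, if_neg hjpos]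
            have hc2 : isChild pos j := by rwa [hipos] at hc
            have h1 : hGet heap c ≤ hGet heap j := hmin j hc2 hj hjc
            rw [hVother c (by omega), hVother j hjpos]
            exact h1
          · rw [if_neg hic, if_neg hipos, if_neg hjc, if_neg hjpos]
            exact inv1 i j hc hj hdi hipos hjpos
      have inv2' : s < c → ∀ j, isChild c j → j < heap.length →
          hGet (swapL V pos c) ((c - 1) / 2) ≤ hGet (swapL V pos c) j := by
        intro _ j hc hj
        have hjgt := (par_of_child c j hc).2
        rw [hparc, hgs pos, hgs j]
        rw [if_neg (by omega : ¬ pos = c), if_pos rfl,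
            if_neg (by omega : ¬ j = c), if_neg (by omega : ¬ j = pos)]
        exact inv1 c j hc hj hdc (by omega) (by omega)
      obtain ⟨c1, c2, c3, c4, c5, c6, c7, c8⟩ :=
        IHk (heap.set pos (hGet heap c)) c s ni h q
          (by rw [hlen']; omega) heq (by omega) (by rw [hlen']; omega) hdc
          (by rw [hswap, hlen']; exact inv1')
          (by rw [hswap, hlen']; exact inv2')
      rw [hswap] at c6 c7
      rw [hlen'] at c1 c3 c5 c8
      refine ⟨c1, c2, c3, c4, c5, ?_, ?_, c8⟩
      · exact c6.trans (swapL_perm V pos c hposV hcV)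
      · intro m hm
        rw [c7 m hm, hgs m]
        have hmpos : m ≠ pos := by intro e; rw [e, hdesc] at hm; simp at hm
        have hmc : m ≠ c := by intro e; rw [e, hdc] at hm; simp at hm
        rw [if_neg hmc, if_neg hmpos]
    · rw [if_neg hguard] at heq
      injection heq with e1 e2
      subst e1; subst e2
      refine ⟨rfl, hsp, hlen, hdesc, hguard, List.Perm.refl _, fun m _ => rfl, ?_⟩
      intro i j hc hj hdi hjq
      have hij := (par_of_child i j hc).2
      by_cases hipos : i = pos
      · exfalso
        have : j ≥ 2 * pos + 1 := by rcases hc with h1 | h1 <;> omega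
        omega
      · exact inv1 i j hc hj hdi hipos hjq

-- ===== combined _siftup spec =====
theorem siftup_spec (heap : List Int) (pos : Nat) (hlen : pos < heap.length)
    (inv : ∀ i j, isChild i j → j < heap.length → descB pos i = true → i ≠ pos →
        hGet heap i ≤ hGet heap j) :
    (siftup heap pos).Perm heap ∧ (siftup heap pos).length = heap.length ∧
    (∀ m, descB pos m = false → hGet (siftup heap pos) m = hGet heap m) ∧
    (∀ i j, isChild i j → j < heap.length → descB pos i = true →
        hGet (siftup heap pos) i ≤ hGet (siftup heap pos) j) := by
  have hself : heap.set pos (hGet heap pos) = heap := set_hGet_self heap pos hlen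
  rcases hE : siftupLoop heap.length heap pos with ⟨h1, q⟩
  obtain ⟨c1, c2, c3, c4, c5, c6, c7, c8⟩ :=
    siftupLoop_spec heap.length heap pos pos (hGet heap pos) h1 q (by omega) hE
      (le_refl pos) hlen (descB_self pos)
      (by rw [hself]; intro i j hc hj hdi hip _; exact inv i j hc hj hdi hip)
      (by omega)
  rw [hself] at c6 c7
  -- now the trailing _siftdown call
  have hx : hGet (h1.set q (hGet heap pos)) q = hGet heap pos := by
    rw [hGet_set]; simp [c1, c3]
  have hxx : (h1.set q (hGet heap pos)).set q (hGet heap pos) = h1.set q (hGet heap pos) :=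
    List.set_set ..
  have hE2 : siftup heap pos = siftdown (h1.set q (hGet heap pos)) pos q := by
    unfold siftup; rw [hE]
  rcases hD : siftdownLoop (q + 1) (h1.set q (hGet heap pos)) pos q (hGet heap pos) with ⟨h2, q2⟩
  obtain ⟨d1, d2, d3, d4, d5, d6⟩ :=
    siftdownLoop_spec (q + 1) q (h1.set q (hGet heap pos)) pos (hGet heap pos) h2 q2 hD
      (by omega) c2
      (by simp only [List.length_set]; omega) c4
      (by rw [hxx]; simpa only [List.length_set, c1] using c8)
      (by rw [hxx]
          intro _ j hc hj
          exfalso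
          have : j ≥ 2 * q + 1 := by rcases hc with h1' | h1' <;> omega
          simp only [List.length_set, c1] at hj
          omega)
  rw [hxx] at d4 d5
  have hres : siftup heap pos = h2.set q2 (hGet heap pos) := by
    rw [hE2]; unfold siftdown; rw [hx, hD]
  rw [hres]
  have hlen2 : (h1.set q (hGet heap pos)).length = heap.length := by simp [c1]
  refine ⟨?_, ?_, ?_, ?_⟩
  · exact (d4.trans c6)
  · have := d1; simp only [List.length_set] at this ⊢; omega
  · intro m hm
    rw [d5 m hm, c7 m hm]
  · intro i j hc hj hdi
    have := d6 i j hc (by rw [hlen2]; exact hj) hdi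
    exact this

-- ===== heap predicate and heapify/heappop/heappush specs =====
def IsHeap (l : List Int) : Prop :=
  ∀ i j, isChild i j → j < l.length → hGet l i ≤ hGet l j

theorem heapify_aux :
    ∀ (m : Nat) (l : List Int), 2 * m ≤ l.length →
    (∀ i j, isChild i j → j < l.length → m ≤ i → hGet l i ≤ hGet l j) →
    ((List.range m).reverse.foldl (fun h i => siftup h i) l).Perm l ∧
    ((List.range m).reverse.foldl (fun h i => siftup h i) l).length = l.length ∧
    (∀ i j, isChild i j → j < l.length →
      hGet ((List.range m).reverse.foldl (fun h i => siftup h i) l) i ≤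
      hGet ((List.range m).reverse.foldl (fun h i => siftup h i) l) j) := by
  intro m
  induction m with
  | zero =>
    intro l _ hp
    simp only [List.range_zero, List.reverse_nil, List.foldl_nil]
    exact ⟨List.Perm.refl _, by simp, fun i j hc hj => hp i j hc hj (Nat.zero_le i)⟩
  | succ m IH =>
    intro l hm hp
    have hstep : (List.range (m + 1)).reverse = m :: (List.range m).reverse := by
      rw [List.range_succ, List.reverse_append]; rfl
    rw [hstep, List.foldl_cons]
    have hmlt : m < l.length := by omega
    obtain ⟨p1, p2, p3, p4⟩ := siftup_spec l m hmlt
      (fun i j hc hj hdi hip => hp i j hc hj (by have := descB_le i m hdi; omega))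
    have hp' : ∀ i j, isChild i j → j < (siftup l m).length → m ≤ i →
        hGet (siftup l m) i ≤ hGet (siftup l m) j := by
      intro i j hc hj hmi
      rw [p2] at hj
      by_cases hdi : descB m i = true
      · exact p4 i j hc hj hdi
      · have hine : i ≠ m := by
          intro e; rw [e, descB_self] at hdi; exact hdi rfl
        have hdj : descB m j = false := by
          cases hj2 : descB m j
          · rfl
          · exfalso
            have hjm : j ≠ m := by
              have := (par_of_child i j hc).2; omega
            have := (descB_par m j hj2 hjm).2
            rw [(par_of_child i j hc).1] at hdi
            exact hdi this
        rw [p3 i (by simpa using hdi), p3 j hdj]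
        exact hp i j hc hj (by omega)
    obtain ⟨q1, q2, q3⟩ := IH (siftup l m) (by omega) hp'
    refine ⟨q1.trans p1, by rw [q2, p2], ?_⟩
    intro i j hc hj
    exact q3 i j hc (by rw [p2]; exact hj)

theorem heapify_spec (x : List Int) :
    (heapify x).Perm x ∧ (heapify x).length = x.length ∧ IsHeap (heapify x) := by
  obtain ⟨p1, p2, p3⟩ := heapify_aux (x.length / 2) x (by omega)
    (by intro i j hc hj hmi
        exfalso
        have : j ≥ 2 * (x.length / 2) + 1 := by rcases hc with h1 | h1 <;> omega
        omega)
  exact ⟨p1, p2, fun i j hc hj => p3 i j hc (by rw [← p2]; exact hj)⟩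

theorem heap_min (l : List Int) (hh : IsHeap l) : ∀ i, i < l.length → hGet l 0 ≤ hGet l i := by
  intro i
  induction i using Nat.strong_induction_on with
  | _ i IH =>
    intro hi
    cases i with
    | zero => exact le_refl _
    | succ n =>
      have h1 : isChild ((n + 1 - 1) / 2) (n + 1) := child_par (n + 1) (by omega)
      have h2 : (n + 1 - 1) / 2 < n + 1 := by omega
      exact le_trans (IH _ h2 (by omega)) (hh _ _ h1 hi)

theorem heap_min_mem (l : List Int) (hh : IsHeap l) : ∀ x ∈ l, hGet l 0 ≤ x := by
  intro x hx
  obtain ⟨i, hi, rfl⟩ := List.mem_iff_getElem.mp hx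
  rw [← hGet_eq_getElem l i hi]
  exact heap_min l hh i hi

theorem heappush_spec (h : List Int) (x : Int) (hh : IsHeap h) :
    (heappush h x).Perm (x :: h) ∧ IsHeap (heappush h x) := by
  have hlen : (h ++ [x]).length = h.length + 1 := by simp
  have hself : (h ++ [x]).set h.length (hGet (h ++ [x]) h.length) = h ++ [x] :=
    set_hGet_self _ _ (by omega)
  have hget : ∀ m, m < h.length → hGet (h ++ [x]) m = hGet h m := by
    intro m hm
    rw [hGet_eq_getElem _ m (by omega), hGet_eq_getElem h m hm]
    exact List.getElem_append_left hm
  have hE2 : heappush h x = siftdown (h ++ [x]) 0 h.length := by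
    unfold heappush; rw [hlen]; norm_num
  rcases hD : siftdownLoop (h.length + 1) (h ++ [x]) 0 h.length (hGet (h ++ [x]) h.length)
    with ⟨h2, q2⟩
  obtain ⟨d1, d2, d3, d4, d5, d6⟩ :=
    siftdownLoop_spec (h.length + 1) h.length (h ++ [x]) 0 (hGet (h ++ [x]) h.length) h2 q2 hD
      (by omega) (Nat.zero_le _) (by omega) (descB_zero _)
      (by rw [hself]
          intro i j hc hj hdi hjne
          have hij := (par_of_child i j hc).2
          rw [hlen] at hj
          have hjlt : j < h.length := by omega
          rw [hget i (by omega), hget j hjlt]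
          exact hh i j hc hjlt)
      (by intro hpos j hc hj
          exfalso
          have : j ≥ 2 * h.length + 1 := by rcases hc with h1 | h1 <;> omega
          rw [hlen] at hj; omega)
  rw [hself] at d4 d5
  have hres : heappush h x = h2.set q2 (hGet (h ++ [x]) h.length) := by
    rw [hE2]; unfold siftdown; rw [hD]
  constructor
  · rw [hres]
    exact d4.trans (by simpa using List.perm_append_singleton x h)
  · intro i j hc hj
    rw [hres] at hj ⊢
    have hjlt : j < (h ++ [x]).length := by
      simp only [List.length_set] at hj; omega
    exact d6 i j hc hjlt (descB_zero i)

theorem heappop_spec (h : List Int) (hne : h ≠ []) (hh : IsHeap h) :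
    (heappop h).1 = hGet h 0 ∧ ((heappop h).1 :: (heappop h).2).Perm h ∧
    IsHeap (heappop h).2 := by
  have hlen0 : h.length ≠ 0 := by simpa using hne
  by_cases h1 : h.dropLast.isEmpty
  · -- length-1 heap
    rw [List.isEmpty_iff] at h1
    have hl1 : h.length = 1 := by
      have := congrArg List.length h1
      simp only [List.length_dropLast, List.length_nil] at this
      omega
    have hpop : heappop h = (hGet h (h.length - 1), []) := by
      unfold heappop
      rw [if_neg (by simpa using hne), if_pos (by rwa [List.isEmpty_iff])]
    rw [hpop]
    obtain ⟨a, rfl⟩ : ∃ a, h = [a] := by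
      cases h with
      | nil => simp at hl1
      | cons a t =>
        cases t with
        | nil => exact ⟨a, rfl⟩
        | cons b t => simp at hl1
    refine ⟨rfl, by simp [hGet], ?_⟩
    intro i j hc hj
    simp at hj
  · -- general case
    rw [List.isEmpty_iff] at h1
    have hrl : h.dropLast.length = h.length - 1 := by simp
    have hrlen0 : h.dropLast.length ≠ 0 := by
      intro e
      exact h1 (List.length_eq_zero_iff.mp e)
    have hlen2 : 2 ≤ h.length := by omega
    have hgd : ∀ m, m < h.length - 1 → hGet h.dropLast m = hGet h m := by
      intro m hm
      rw [hGet_eq_getElem _ m (by omega), hGet_eq_getElem h m (by omega)]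
      simp [List.getElem_dropLast]
    set le := hGet h (h.length - 1) with hle
    set r0 := h.dropLast.set 0 le with hr0
    have hr0len : r0.length = h.length - 1 := by simp [hr0, hrl]
    have hpop : heappop h = (hGet h.dropLast 0, siftup r0 0) := by
      unfold heappop
      rw [if_neg (by simpa using hne), if_neg (by simpa using h1)]
    obtain ⟨p1, p2, p3, p4⟩ := siftup_spec r0 0 (by omega)
      (by intro i j hc hj hdi hip
          have hij := (par_of_child i j hc).2
          rw [hr0len] at hj
          have e1 : hGet r0 i = hGet h i := by
            rw [hr0, hGet_set,
                if_neg (show ¬(0 = i ∧ 0 < h.dropLast.length) from by omega)]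
            exact hgd i (by omega)
          have e2 : hGet r0 j = hGet h j := by
            rw [hr0, hGet_set,
                if_neg (show ¬(0 = j ∧ 0 < h.dropLast.length) from by omega)]
            exact hgd j (by omega)
          rw [e1, e2]
          exact hh i j hc (by omega))
    rw [hpop]
    refine ⟨hgd 0 (by omega), ?_, ?_⟩
    · -- permutation: hGet h 0 :: siftup r0 0 ~ h
      have hperm1 : (hGet h.dropLast 0 :: siftup r0 0).Perm (hGet h.dropLast 0 :: r0) :=
        p1.cons _
      have hperm2 : (hGet h.dropLast 0 :: r0).Perm (le :: h.dropLast) := by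
        exact getD_cons_set_perm h.dropLast 0 le (by omega)
      have hperm3 : (le :: h.dropLast).Perm h := by
        have hcat : h.dropLast ++ [h.getLast hne] = h := List.dropLast_append_getLast hne
        have hlast : le = h.getLast hne := by
          rw [hle, hGet_eq_getElem h _ (by omega), List.getLast_eq_getElem]
        have hps := (List.perm_append_singleton (h.getLast hne) h.dropLast).symm
        rw [hcat] at hps
        rw [hlast]
        exact hps
      exact (hperm1.trans hperm2).trans hperm3
    · intro i j hc hj
      rw [siftup_len, hr0len] at hj
      exact p4 i j hc (by omega) (descB_zero i)

-- ===== sorted-list side =====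
theorem insortB_perm (l : List Int) (x : Int) : (insortB l x).Perm (x :: l) := by
  unfold insortB
  conv_rhs => rw [← List.take_append_drop (insPos l x) l]
  exact List.perm_middle

theorem insortB_cons_le {y x : Int} (ys : List Int) (h : y ≤ x) :
    insortB (y :: ys) x = y :: insortB ys x := by
  unfold insortB
  simp only [insPos, if_pos h, List.take_succ_cons, List.drop_succ_cons, List.cons_append]

theorem insortB_cons_gt {y x : Int} (ys : List Int) (h : ¬ y ≤ x) :
    insortB (y :: ys) x = x :: y :: ys := by
  unfold insortB
  simp only [insPos, if_neg h, List.take_zero, List.drop_zero, List.nil_append]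

theorem insortB_sorted (l : List Int) (x : Int) (hs : l.Pairwise (· ≤ ·)) :
    (insortB l x).Pairwise (· ≤ ·) := by
  induction l with
  | nil => simp [insortB, insPos]
  | cons y ys IH =>
    rcases List.pairwise_cons.mp hs with ⟨hy, hys⟩
    by_cases hyx : y ≤ x
    · rw [insortB_cons_le ys hyx]
      refine List.pairwise_cons.mpr ⟨?_, IH hys⟩
      intro b hb
      have hb2 : b ∈ x :: ys := (insortB_perm ys x).mem_iff.mp hb
      rcases List.mem_cons.mp hb2 with rfl | hbys
      · exact hyx
      · exact hy b hbys
    · rw [insortB_cons_gt ys hyx]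
      refine List.pairwise_cons.mpr ⟨?_, hs⟩
      intro b hb
      rcases List.mem_cons.mp hb with rfl | hbys
      · exact (not_le.mp hyx).le
      · exact le_trans ((not_le.mp hyx).le) (hy b hbys)

theorem altLoop_nil (fuel : Nat) (K ans : Int) : altLoop (fuel + 1) [] K ans = 0 := rfl

theorem altLoop_one (fuel : Nat) (a K ans : Int) :
    altLoop (fuel + 1) [a] K ans = if a ≤ K then -1 else ans := rfl

theorem altLoop_cons2 (fuel : Nat) (a b : Int) (rest : List Int) (K ans : Int) :
    altLoop (fuel + 1) (a :: b :: rest) K ans =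
      if a ≤ K then altLoop fuel (insortB rest (a + b * 2)) K (ans + 1) else ans := rfl

theorem sorted_head_min {a : Int} {t : List Int} (hpw : (a :: t).Pairwise (· ≤ ·)) :
    ∀ x ∈ a :: t, a ≤ x := by
  intro x hx
  rcases List.mem_cons.mp hx with rfl | hxt
  · exact le_refl x
  · exact (List.pairwise_cons.mp hpw).1 x hxt

-- ===== the bridge: the heap loop equals the sorted-list loop =====
theorem bridge : ∀ (fuel : Nat) (h : List Int) (K ans : Int), h.length ≤ fuel → IsHeap h →
    solutionLoop fuel h K ans = altLoop fuel (PySem.List.sorted h (fun x => x) false) K ans := by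
  intro fuel
  induction fuel with
  | zero => intro h K ans _ _; rfl
  | succ n IH =>
    intro h K ans hn hh
    by_cases hne : h = []
    · subst hne
      rw [(PySem.List.sorted_eq_nil_iff [] _ _).mpr rfl, altLoop_nil]
      rw [solutionLoop, if_pos rfl]
    · have hlpos : 0 < h.length := List.length_pos_iff.mpr hne
      have hsp : (PySem.List.sorted h (fun x => x) false).Perm h :=
        PySem.List.sorted_perm h _ _
      have hpw : (PySem.List.sorted h (fun x => x) false).Pairwise (· ≤ ·) := by
        simpa using PySem.List.sorted_pairwise h (fun x => x)
      have hslen : (PySem.List.sorted h (fun x => x) false).length = h.length :=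
        hsp.length_eq
      rcases hsrc : PySem.List.sorted h (fun x => x) false with _ | ⟨a, t⟩
      · exact absurd ((PySem.List.sorted_eq_nil_iff h _ _).mp hsrc) hne
      rw [hsrc] at hsp hpw hslen
      have ha : a = hGet h 0 := by
        have h0mem : hGet h 0 ∈ h := hGet_mem h 0 hlpos
        have hamem : a ∈ h := hsp.subset (List.mem_cons_self)
        have h0s : hGet h 0 ∈ a :: t := hsp.mem_iff.mpr h0mem
        exact le_antisymm (sorted_head_min hpw _ h0s) (heap_min_mem h hh a hamem)
      rw [solutionLoop, if_neg hne]
      by_cases hK : hGet h 0 ≤ K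
      · rw [if_pos hK]
        by_cases hl1 : h.length = 1
        · rw [if_pos hl1]
          have ht : t = [] := by
            rw [hl1] at hslen
            simpa using hslen
          subst ht
          rw [altLoop_one, if_pos (by rw [ha]; exact hK)]
        · rw [if_neg hl1]
          rcases t with _ | ⟨b, rest⟩
          · exfalso; rw [← hslen] at hl1; simp at hl1
          obtain ⟨e1, e2, e3⟩ := heappop_spec h hne hh
          have hp12 : ((heappop h).2).Perm (b :: rest) := by
            have hx : ((heappop h).1 :: (heappop h).2).Perm (a :: b :: rest) :=
              e2.trans hsp.symm
            rw [e1, ← ha] at hx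
            exact hx.cons_inv
          have hp2len : ((heappop h).2).length = h.length - 1 := heappop_len h hne
          have hp2ne : (heappop h).2 ≠ [] := by
            intro e
            rw [e] at hp12
            exact absurd hp12.length_eq (by simp)
          obtain ⟨f1, f2, f3⟩ := heappop_spec (heappop h).2 hp2ne e3
          have hpwt : (b :: rest).Pairwise (· ≤ ·) := (List.pairwise_cons.mp hpw).2
          have hb : (heappop (heappop h).2).1 = b := by
            rw [f1]
            have h0mem : hGet (heappop h).2 0 ∈ (heappop h).2 :=
              hGet_mem _ 0 (by omega)
            have hbmem : b ∈ (heappop h).2 := hp12.mem_iff.mpr List.mem_cons_self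
            exact le_antisymm (heap_min_mem _ e3 b hbmem)
              (sorted_head_min hpwt _ (hp12.mem_iff.mp h0mem))
          have hp22 : ((heappop (heappop h).2).2).Perm rest := by
            have hx : ((heappop (heappop h).2).1 :: (heappop (heappop h).2).2).Perm (b :: rest) :=
              f2.trans hp12
            rw [hb] at hx
            exact hx.cons_inv
          have hv : (heappop h).1 + (heappop (heappop h).2).1 * 2 = a + b * 2 := by
            rw [e1, hb, ha]
          obtain ⟨g1, g2⟩ := heappush_spec ((heappop (heappop h).2).2)
            ((heappop h).1 + (heappop (heappop h).2).1 * 2) f3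
          have hpushlen :
              (heappush ((heappop (heappop h).2).2)
                ((heappop h).1 + (heappop (heappop h).2).1 * 2)).length = h.length - 1 := by
            rw [heappush_len, heappop_len _ hp2ne, hp2len]
            omega
          have hsortpush :
              PySem.List.sorted (heappush ((heappop (heappop h).2).2)
                  ((heappop h).1 + (heappop (heappop h).2).1 * 2)) (fun x => x) false =
              insortB rest (a + b * 2) := by
            apply PySem.List.eq_of_perm_of_pairwise_le_of_injective (fun x => x)
              (fun _ _ e => e)
            · refine ((PySem.List.sorted_perm _ _ _).trans ?_).trans
                (insortB_perm rest (a + b * 2)).symm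
              rw [← hv]
              exact g1.trans (hp22.cons _)
            · simpa using PySem.List.sorted_pairwise _ (fun x => x)
            · exact insortB_sorted rest (a + b * 2) (List.pairwise_cons.mp hpwt).2
          rw [IH _ K (ans + 1) (by omega) g2, hsortpush]
          rw [altLoop_cons2, if_pos (by rw [ha]; exact hK)]
      · rw [if_neg hK]
        have haK : ¬ a ≤ K := by rw [ha]; exact hK
        rcases t with _ | ⟨b, rest⟩
        · rw [altLoop_one, if_neg haK]
        · rw [altLoop_cons2, if_neg haK]

-- ===== VERDICT (by name: the statement is the Claim_ definition above) =====
theorem solution_spec : Claim_equal_solution := by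
  intro scoville K _ _
  show solution scoville K = solution_alt scoville K
  obtain ⟨hp, hlen, hh⟩ := heapify_spec scoville
  unfold solution solution_alt
  rw [bridge scoville.length (heapify scoville) K 0 (by omega) hh]
  congr 1
  apply PySem.List.eq_of_perm_of_pairwise_le_of_injective (fun x => x) (fun _ _ e => e)
  · exact (PySem.List.sorted_perm _ _ _).trans
      (hp.trans (PySem.List.sorted_perm scoville _ _).symm)
  · simpa using PySem.List.sorted_pairwise _ (fun x => x)
  · simpa using PySem.List.sorted_pairwise _ (fun x => x)
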